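-- pv_equiv track=rewrite | github.com/edoomm/proyecto-senales | src/operacionConvolucion.py | convolucionar_arreglos
-- ===== SOURCE A (Python) =====
-- def convolucionar_arreglos (arr1, arr2):
--     nueva_longitud = len(arr1) + len(arr2) - 1
--
--     # aplicamos el algoritmo de suma de columnas
--     # creamos una matriz de 0s de la nueva_longitud x el tamanio del arreglo 2
--     resultados = [[0 for i in range(nueva_longitud)] for j in range(len(arr2))]
--     for i in range(0, len(arr2)):
--         for j in range(0, len(arr1)):
--             resultados[i][i + j] = arr2[i] * arr1[j]
--     # en resultados se guardan los resultados de las multiplicaciones.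
--     # por ejemplo:
--     #   para [1,2,3] * [5,2]
--     #   resultados = [
--     #                   [5,10,15,0]
--     #                   [0, 2, 4,6]
--     #                ]
--
--     # Sumamos por filas la matriz resultados:
--     #   para
--     #   resultados = [
--     #                   [5,10,15,0]
--     #                   [0, 2, 4,6]
--     #                ]
--     #   resultado =     [5,12,19,6]
--
--     resultado = [0 for i in range(nueva_longitud)]
--     for i in range(0, len(arr2)):
--         for j in range(0, nueva_longitud):
--             resultado[j] += resultados[i][j]
--     # regresamos el arreglo con el resultado
--     return resultado
-- ===== SOURCE B (Python) =====
-- def convolucionar_arreglos(arr1, arr2):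
--     # gather pass: one running sum per output index, no intermediate matrix
--     longitud = len(arr1) + len(arr2) - 1
--     resultado = []
--     for k in range(longitud):
--         s = 0
--         for i in range(len(arr2)):
--             j = k - i
--             if 0 <= j < len(arr1):
--                 s += arr2[i] * arr1[j]
--         resultado.append(s)
--     return resultado
-- ===== Notes on version B (the rewrite author's own statement) =====
-- stated objective: simpler
-- what changed: Output-centric gather: each output cell k directly accumulates sum_i arr2[i]*arr1[k-i] in one running sum, instead of A's scatter into a len(arr2) x L zero matrix followed by a second row-summation pass.
import Mathlib
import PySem

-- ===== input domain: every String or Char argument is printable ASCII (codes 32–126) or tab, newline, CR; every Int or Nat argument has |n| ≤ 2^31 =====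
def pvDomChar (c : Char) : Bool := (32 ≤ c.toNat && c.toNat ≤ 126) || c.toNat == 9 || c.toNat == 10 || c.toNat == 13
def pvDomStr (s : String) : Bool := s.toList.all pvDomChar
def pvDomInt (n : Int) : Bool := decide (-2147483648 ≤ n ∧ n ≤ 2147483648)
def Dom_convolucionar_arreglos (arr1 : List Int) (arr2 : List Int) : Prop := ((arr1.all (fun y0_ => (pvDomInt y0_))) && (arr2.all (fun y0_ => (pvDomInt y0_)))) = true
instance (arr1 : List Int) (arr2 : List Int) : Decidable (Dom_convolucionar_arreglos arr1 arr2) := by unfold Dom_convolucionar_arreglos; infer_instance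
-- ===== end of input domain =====

-- B replaces A's scatter-into-matrix-then-row-sum by a single gather pass with one running sum per output cell.

-- ===== PORT A =====
-- Python's len(arr1)+len(arr2)-1 is negative only when both lists are empty, where range() is empty;
-- Nat truncated subtraction yields exactly the same effective range length, so `List.range` below is exact.
-- All list indices A uses (arr2[i], arr1[j], resultados[i][i+j], resultado[j], resultados[i][j]) are
-- provably in range on every input, so `getD`/`set` are exact ports of Python indexing/assignment here.
def convolucionar_arreglos (arr1 : List Int) (arr2 : List Int) : List Int :=
  let nueva_longitud := arr1.length + arr2.length - 1
  -- resultados = [[0]*nueva_longitud for j in range(len(arr2))]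
  let resultados : List (List Int) :=
    (List.range arr2.length).map (fun _ => (List.range nueva_longitud).map (fun _ => (0 : Int)))
  -- scatter: resultados[i][i+j] = arr2[i] * arr1[j]
  let resultados :=
    (List.range arr2.length).foldl (fun m i =>
      (List.range arr1.length).foldl (fun m j =>
        m.set i ((m.getD i []).set (i + j) ((arr2.getD i 0) * (arr1.getD j 0)))) m) resultados
  -- resultado = [0]*nueva_longitud; resultado[j] += resultados[i][j]
  let resultado : List Int := (List.range nueva_longitud).map (fun _ => (0 : Int))
  (List.range arr2.length).foldl (fun r i =>
    (List.range nueva_longitud).foldl (fun r j =>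
      r.set j ((r.getD j 0) + ((resultados.getD i []).getD j 0))) r) resultado

-- ===== PORT B =====
-- `i ≤ k ∧ k - i < arr1.length` over Nat is exactly Python's `0 <= k-i < len(arr1)` over int.
def convolucionar_arreglos_alt (arr1 : List Int) (arr2 : List Int) : List Int :=
  let longitud := arr1.length + arr2.length - 1
  (List.range longitud).foldl (fun resultado k =>
    resultado ++ [(List.range arr2.length).foldl (fun s i =>
      if i ≤ k ∧ k - i < arr1.length then s + (arr2.getD i 0) * (arr1.getD (k - i) 0) else s) 0]) []

-- ===== PRECONDITION & SPEC =====
def Spec_convolucionar_arreglos (arr1 : List Int) (arr2 : List Int) (out : List Int) : Prop := out = convolucionar_arreglos_alt arr1 arr2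
instance (arr1 : List Int) (arr2 : List Int) (out : List Int) : Decidable (Spec_convolucionar_arreglos arr1 arr2 out) := by unfold Spec_convolucionar_arreglos; infer_instance

-- ===== CLAIM (what is proved, stated in full; the proofs are below) =====
def Claim_equal_convolucionar_arreglos : Prop := ∀ (arr1 : List Int) (arr2 : List Int), Dom_convolucionar_arreglos arr1 arr2 → Spec_convolucionar_arreglos arr1 arr2 (convolucionar_arreglos arr1 arr2)

-- ===== LEMMAS AND PROOFS =====

-- the contribution of row i to output column k (the value A's matrix stores at resultados[i][k])
def pvCell (arr1 arr2 : List Int) (i k : Nat) : Int :=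
  if i ≤ k ∧ k - i < arr1.length then (arr2.getD i 0) * (arr1.getD (k - i) 0) else 0

-- a fold that at step a sets index a from its own old value, over distinct in-range indices
lemma foldl_set_upd {α : Type} (d : α) (g : Nat → α → α) :
    ∀ (l : List Nat) (m : List α), l.Nodup → (∀ x ∈ l, x < m.length) →
      ∀ i, ((l.foldl (fun m a => m.set a (g a (m.getD a d))) m).getD i d) =
        if i ∈ l then g i (m.getD i d) else m.getD i d := by
  intro l
  induction l with
  | nil => intro m _ _ i; simp
  | cons a l ih =>
    intro m hnd hlt i
    have ha : a < m.length := hlt a (by simp)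
    have hnd' : l.Nodup := (List.nodup_cons.mp hnd).2
    have hal : a ∉ l := (List.nodup_cons.mp hnd).1
    simp only [List.foldl_cons]
    rw [ih _ hnd' (by intro x hx; simpa using hlt x (List.mem_cons_of_mem _ hx))]
    by_cases hil : i ∈ l
    · have hia : i ≠ a := fun h => hal (h ▸ hil)
      simp [hil, hia, List.getD, List.getElem?_set_ne (Ne.symm hia)]
    · by_cases hia : i = a
      · subst hia
        simp [hil, List.getD, List.getElem?_set_self ha]
      · simp [hil, hia, List.getD, List.getElem?_set_ne (Ne.symm hia)]

-- the inner scatter fold: sets positions i+j, j ∈ l, of a row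
lemma foldl_set_row (i : Nat) (v : Nat → Int) :
    ∀ (l : List Nat) (row : List Int), l.Nodup → (∀ j ∈ l, i + j < row.length) →
      ∀ k, ((l.foldl (fun r j => r.set (i + j) (v j)) row).getD k 0) =
        if i ≤ k ∧ (k - i) ∈ l then v (k - i) else row.getD k 0 := by
  intro l
  induction l with
  | nil => intro row _ _ k; simp
  | cons a l ih =>
    intro row hnd hlt k
    have ha : i + a < row.length := hlt a (by simp)
    have hnd' : l.Nodup := (List.nodup_cons.mp hnd).2
    have hal : a ∉ l := (List.nodup_cons.mp hnd).1
    simp only [List.foldl_cons]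
    rw [ih _ hnd' (by intro x hx; simpa using hlt x (List.mem_cons_of_mem _ hx))]
    by_cases hc : i ≤ k ∧ (k - i) ∈ l
    · simp [hc.1, hc.2]
    · by_cases hk : k = i + a
      · subst hk
        have h1 : i ≤ i + a := Nat.le_add_right i a
        have h2 : i + a - i = a := by omega
        simp [h1, h2, List.getD, List.getElem?_set_self ha]
      · have hne : i + a ≠ k := fun h => hk h.symm
        have : ¬ (i ≤ k ∧ k - i = a) := by rintro ⟨h1, h2⟩; omega
        have hcond : (i ≤ k ∧ (k - i) ∈ a :: l) ↔ (i ≤ k ∧ (k - i) ∈ l) := by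
          constructor
          · rintro ⟨h1, h2⟩
            rcases List.mem_cons.mp h2 with h | h
            · exact absurd ⟨h1, h⟩ this
            · exact ⟨h1, h⟩
          · rintro ⟨h1, h2⟩; exact ⟨h1, List.mem_cons_of_mem _ h2⟩
        simp only [hcond]
        simp [hc, List.getD, List.getElem?_set_ne hne]

lemma length_foldl_set {α : Type} (f : List α → Nat → Nat) (v : List α → Nat → α)
    (l : List Nat) (m : List α) :
    (l.foldl (fun m a => m.set (f m a) (v m a)) m).length = m.length := by
  induction l generalizing m with
  | nil => rfl
  | cons a l ih => simp [List.foldl_cons, ih, List.length_set]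

-- getD of the all-zeros list is 0 everywhere
lemma getD_zeros (n k : Nat) : ((List.range n).map (fun _ => (0 : Int))).getD k 0 = 0 := by
  rcases lt_or_ge k n with h | h
  · simp only [List.getD]
    rw [List.getElem?_map, List.getElem?_range h]
    rfl
  · rw [List.getD_eq_default]
    simpa using h

-- collapse the inner scatter fold into a single row transformation
lemma collapse_inner (arr1 arr2 : List Int) (i' : Nat) :
    ∀ (l : List Nat) (m : List (List Int)), i' < m.length →
      l.foldl (fun m j =>
        m.set i' ((m.getD i' []).set (i' + j) ((arr2.getD i' 0) * (arr1.getD j 0)))) m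
      = m.set i' (l.foldl (fun r j => r.set (i' + j) ((arr2.getD i' 0) * (arr1.getD j 0))) (m.getD i' [])) := by
  intro l
  induction l with
  | nil =>
    intro m hm
    simp [List.getD, List.getElem?_eq_getElem hm, List.set_getElem_self]
  | cons a l ih =>
    intro m hm
    simp only [List.foldl_cons]
    rw [ih _ (by simpa using hm)]
    have hget : ((m.set i' ((m.getD i' []).set (i' + a) ((arr2.getD i' 0) * (arr1.getD a 0)))).getD i' []) =
        (m.getD i' []).set (i' + a) ((arr2.getD i' 0) * (arr1.getD a 0)) := by
      simp [List.getD, List.getElem?_set_self hm]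
    rw [hget, List.set_set]

-- the outer scatter fold is an instance of foldl_set_upd
lemma outer_rw (arr1 arr2 : List Int) :
    ∀ (l : List Nat) (m : List (List Int)), (∀ x ∈ l, x < m.length) →
      l.foldl (fun m i' =>
        (List.range arr1.length).foldl (fun m j =>
          m.set i' ((m.getD i' []).set (i' + j) ((arr2.getD i' 0) * (arr1.getD j 0)))) m) m
      = l.foldl (fun m i' =>
        m.set i' ((fun i' row => (List.range arr1.length).foldl
          (fun r j => r.set (i' + j) ((arr2.getD i' 0) * (arr1.getD j 0))) row) i' (m.getD i' []))) m := by
  intro l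
  induction l with
  | nil => intro m _; rfl
  | cons a l ih =>
    intro m hlt
    have ha : a < m.length := hlt a (by simp)
    simp only [List.foldl_cons]
    rw [collapse_inner arr1 arr2 a _ m ha]
    exact ih _ (by intro x hx; simpa using hlt x (List.mem_cons_of_mem _ hx))

-- A's scattered matrix, entrywise: row i, column k holds pvCell arr1 arr2 i k
lemma matrix_entry (arr1 arr2 : List Int) (i k : Nat) (hi : i < arr2.length) :
    ((((List.range arr2.length).foldl (fun m i =>
        (List.range arr1.length).foldl (fun m j =>
          m.set i ((m.getD i []).set (i + j) ((arr2.getD i 0) * (arr1.getD j 0)))) m)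
        ((List.range arr2.length).map (fun _ => (List.range (arr1.length + arr2.length - 1)).map (fun _ => (0 : Int))))).getD i []).getD k 0)
      = pvCell arr1 arr2 i k := by
  set L := arr1.length + arr2.length - 1 with hL
  set m0 : List (List Int) := (List.range arr2.length).map (fun _ => (List.range L).map (fun _ => (0 : Int))) with hm0
  have hlen0 : m0.length = arr2.length := by simp [hm0]
  have houter := foldl_set_upd ([] : List Int)
      (fun i' row => (List.range arr1.length).foldl
        (fun r j => r.set (i' + j) ((arr2.getD i' 0) * (arr1.getD j 0))) row)
      (List.range arr2.length) m0 (List.nodup_range) (by intro x hx; simpa [hlen0] using List.mem_range.mp hx) i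
  rw [outer_rw arr1 arr2 (List.range arr2.length) m0
      (by intro x hx; rw [hlen0]; exact List.mem_range.mp hx), houter]
  simp only [List.mem_range.mpr hi, if_pos]
  have hrow0 : m0.getD i [] = (List.range L).map (fun _ => (0 : Int)) := by
    simp only [hm0, List.getD]
    rw [List.getElem?_map, List.getElem?_range hi]
    rfl
  rw [hrow0]
  have hscatter := foldl_set_row i (fun j => (arr2.getD i 0) * (arr1.getD j 0))
      (List.range arr1.length) ((List.range L).map (fun _ => (0 : Int)))
      List.nodup_range
      (by intro j hj
          have hj' := List.mem_range.mp hj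
          simp only [List.length_map, List.length_range]
          omega) k
  rw [hscatter]
  simp only [List.mem_range, pvCell]
  by_cases hc : i ≤ k ∧ k - i < arr1.length
  · simp [hc.1, hc.2]
  · rw [if_neg hc, if_neg (by tauto)]
    exact getD_zeros L k

-- the summation double fold adds, columnwise, each listed row's column-k entry
lemma sum_fold (w : Nat → Nat → Int) (L : Nat) :
    ∀ (l : List Nat) (r : List Int), r.length = L →
      ∀ k, k < L →
        ((l.foldl (fun r i => (List.range L).foldl (fun r j => r.set j ((r.getD j 0) + w i j)) r) r).getD k 0)
          = r.getD k 0 + (l.map (fun i => w i k)).sum := by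
  intro l
  induction l with
  | nil => intro r _ k _; simp
  | cons a l ih =>
    intro r hr k hk
    simp only [List.foldl_cons]
    have hstep : ∀ k', k' < L →
        (((List.range L).foldl (fun r j => r.set j ((r.getD j 0) + w a j)) r).getD k' 0)
          = r.getD k' 0 + w a k' := by
      intro k' hk'
      have := foldl_set_upd (0 : Int) (fun j x => x + w a j) (List.range L) r
        List.nodup_range (by intro x hx; rw [hr]; exact List.mem_range.mp hx) k'
      rw [this, if_pos (List.mem_range.mpr hk')]
    have hlen : ((List.range L).foldl (fun r j => r.set j ((r.getD j 0) + w a j)) r).length = L := by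
      rw [length_foldl_set (fun _ j => j) (fun r j => r.getD j 0 + w a j), hr]
    rw [ih _ hlen k hk, hstep k hk]
    simp [add_assoc]

-- B's fold builds the map of per-column sums
lemma alt_eq_map (arr1 arr2 : List Int) :
    convolucionar_arreglos_alt arr1 arr2
      = (List.range (arr1.length + arr2.length - 1)).map
          (fun k => ((List.range arr2.length).map (fun i => pvCell arr1 arr2 i k)).sum) := by
  unfold convolucionar_arreglos_alt
  rw [PySem.List.foldl_append_singleton_eq_map]
  apply List.map_congr_left
  intro k _
  -- inner conditional fold = sum of cells
  have : ∀ (l : List Nat) (s : Int),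
      l.foldl (fun s i =>
        if i ≤ k ∧ k - i < arr1.length then s + (arr2.getD i 0) * (arr1.getD (k - i) 0) else s) s
      = s + (l.map (fun i => pvCell arr1 arr2 i k)).sum := by
    intro l
    induction l with
    | nil => intro s; simp
    | cons a l ih =>
      intro s
      simp only [List.foldl_cons, List.map_cons, List.sum_cons]
      by_cases hc : a ≤ k ∧ k - a < arr1.length
      · rw [if_pos hc, ih]
        have hpc : pvCell arr1 arr2 a k = (arr2.getD a 0) * (arr1.getD (k - a) 0) := by
          simp [pvCell, hc.1, hc.2]
        rw [hpc]; ring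
      · rw [if_neg hc, ih]
        have hpc : pvCell arr1 arr2 a k = 0 := by simp [pvCell, hc]
        rw [hpc]; ring
  rw [this]
  simp

-- the nested summation fold preserves the list length
lemma length_sum_fold (w : Nat → Nat → Int) (L : Nat) :
    ∀ (l : List Nat) (r : List Int),
      (l.foldl (fun r i => (List.range L).foldl (fun r j => r.set j ((r.getD j 0) + w i j)) r) r).length = r.length := by
  intro l
  induction l with
  | nil => intro r; rfl
  | cons a l ih =>
    intro r
    simp only [List.foldl_cons]
    rw [ih, length_foldl_set (fun _ j => j) (fun r j => r.getD j 0 + w a j)]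

-- A computes the same map
lemma a_eq_map (arr1 arr2 : List Int) :
    convolucionar_arreglos arr1 arr2
      = (List.range (arr1.length + arr2.length - 1)).map
          (fun k => ((List.range arr2.length).map (fun i => pvCell arr1 arr2 i k)).sum) := by
  unfold convolucionar_arreglos
  set L := arr1.length + arr2.length - 1 with hL
  set M := (List.range arr2.length).foldl (fun m i =>
      (List.range arr1.length).foldl (fun m j =>
        m.set i ((m.getD i []).set (i + j) ((arr2.getD i 0) * (arr1.getD j 0)))) m)
      ((List.range arr2.length).map (fun _ => (List.range L).map (fun _ => (0 : Int)))) with hM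
  have hz : ((List.range L).map (fun _ => (0 : Int))).length = L := by simp
  apply List.ext_getElem
  · rw [length_sum_fold (fun i j => (M.getD i []).getD j 0) L, hz]
    simp
  · intro k hk1 hk2
    have hkL : k < L := by
      rw [length_sum_fold (fun i j => (M.getD i []).getD j 0) L, hz] at hk1
      exact hk1
    have hgetD : ∀ (xs : List Int) (h : k < xs.length), xs[k] = xs.getD k 0 := by
      intro xs h
      simp [List.getD, List.getElem?_eq_getElem h]
    rw [hgetD _ hk1, hgetD _ hk2]
    rw [sum_fold (fun i j => (M.getD i []).getD j 0) L (List.range arr2.length)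
        ((List.range L).map (fun _ => (0 : Int))) hz k hkL]
    rw [getD_zeros, zero_add]
    have hrhs : ((List.range L).map
        (fun k => ((List.range arr2.length).map (fun i => pvCell arr1 arr2 i k)).sum)).getD k 0
        = ((List.range arr2.length).map (fun i => pvCell arr1 arr2 i k)).sum := by
      simp [List.getD, List.getElem?_map, List.getElem?_range hkL]
    rw [hrhs]
    congr 1
    apply List.map_congr_left
    intro i hi
    exact matrix_entry arr1 arr2 i k (List.mem_range.mp hi)

-- ===== VERDICT (by name: the statement is the Claim_ definition above) =====
theorem convolucionar_arreglos_spec : Claim_equal_convolucionar_arreglos := by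
  intro arr1 arr2 _
  unfold Spec_convolucionar_arreglos
  rw [a_eq_map, alt_eq_map]
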